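-- pv_equiv track=rewrite | github.com/takatodo/gpu-toggle-coverage-campaigns | src/grpo/grpo_coverage_common.py | _policy_candidate_target_regions
-- ===== SOURCE A (Python) =====
-- from typing import Any
--
-- def _policy_candidate_target_regions(candidate: dict[str, Any]) -> list[str]:
--     return sorted(
--         {
--             str(region or "").strip()
--             for region in list(candidate.get("target_regions") or [])
--             if str(region or "").strip()
--         }
--     )
-- ===== SOURCE B (Python) =====
-- def _policy_candidate_target_regions(candidate):
--     out = []
--     for region in list(candidate.get("target_regions") or []):
--         s = str(region or "").strip()
--         if not s:
--             continue
--         lo, hi = 0, len(out)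
--         while lo < hi:
--             mid = (lo + hi) // 2
--             if out[mid] < s:
--                 lo = mid + 1
--             else:
--                 hi = mid
--         if lo == len(out) or out[lo] != s:
--             out.insert(lo, s)
--     return out
-- ===== Notes on version B (the rewrite author's own statement) =====
-- stated objective: alternative
-- what changed: Replaces A's build-a-set-then-sort with a single incremental pass that maintains a sorted duplicate-free list, locating each cleaned string's position by a hand-written binary search and inserting it only if absent (no set and no sort call).
import Mathlib
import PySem

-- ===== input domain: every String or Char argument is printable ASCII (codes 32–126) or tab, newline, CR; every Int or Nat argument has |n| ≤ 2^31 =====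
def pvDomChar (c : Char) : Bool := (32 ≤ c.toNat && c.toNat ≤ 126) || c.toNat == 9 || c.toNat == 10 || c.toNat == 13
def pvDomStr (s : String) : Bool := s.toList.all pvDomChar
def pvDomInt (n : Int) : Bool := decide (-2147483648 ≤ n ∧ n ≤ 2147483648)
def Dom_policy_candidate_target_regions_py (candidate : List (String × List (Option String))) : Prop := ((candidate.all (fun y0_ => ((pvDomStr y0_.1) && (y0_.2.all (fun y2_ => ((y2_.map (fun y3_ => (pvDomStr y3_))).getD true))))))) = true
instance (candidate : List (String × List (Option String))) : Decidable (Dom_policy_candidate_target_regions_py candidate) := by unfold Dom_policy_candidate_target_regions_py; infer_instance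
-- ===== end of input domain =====

-- B replaces A's set-comprehension + sorted() with a single pass that keeps a
-- sorted duplicate-free list via hand-written binary-search insertion (no set, no sort call).

-- ===== PORT A =====
-- str(region or "").strip()
def pvClean (region : Option String) : String := PySem.Str.strip (region.getD "")

def policy_candidate_target_regions_py (candidate : List (String × List (Option String))) : List String :=
  -- sorted({clean(region) for region in list(candidate.get("target_regions") or []) if clean(region)})
  PySem.List.sorted
    (PySem.Set.ofList ((((PySem.Dict.mk candidate).get? "target_regions").getD []).filterMap
      (fun region => if pvClean region ≠ "" then some (pvClean region) else none)))
    (fun x => x) false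

-- ===== PORT B =====
-- the while loop: while lo < hi: mid = (lo+hi)//2; if out[mid] < s: lo = mid+1 else: hi = mid
-- lo, hi, mid are always nonnegative and mid < len(out), so Nat indices and List.getD are
-- exact for Python's out[mid] here.
def pvBis (out : List String) (s : String) (lo hi : Nat) : Nat :=
  if lo < hi then
    let mid := (lo + hi) / 2
    if out.getD mid "" < s then pvBis out s (mid + 1) hi else pvBis out s lo mid
  else lo
termination_by hi - lo
decreasing_by all_goals omega

-- the body of B's loop for one region:
-- s = str(region or "").strip(); if not s: continue; binary search; conditional insert
def pvInsStep (out : List String) (region : Option String) : List String :=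
  let s := PySem.Str.strip (region.getD "")
  if s = "" then out
  else
    let lo := pvBis out s 0 out.length
    if lo = out.length ∨ out.getD lo "" ≠ s then PySem.List.insert out (lo : Int) s else out

def policy_candidate_target_regions_py_alt (candidate : List (String × List (Option String))) : List String :=
  (((PySem.Dict.mk candidate).get? "target_regions").getD []).foldl pvInsStep []

-- ===== PRECONDITION & SPEC =====
def Spec_policy_candidate_target_regions_py (candidate : List (String × List (Option String))) (out : List String) : Prop := out = policy_candidate_target_regions_py_alt candidate
instance (candidate : List (String × List (Option String))) (out : List String) : Decidable (Spec_policy_candidate_target_regions_py candidate out) := by unfold Spec_policy_candidate_target_regions_py; infer_instance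

-- ===== CLAIM (what is proved, stated in full; the proofs are below) =====
def Claim_equal_policy_candidate_target_regions_py : Prop := ∀ (candidate : List (String × List (Option String))), Dom_policy_candidate_target_regions_py candidate → Spec_policy_candidate_target_regions_py candidate (policy_candidate_target_regions_py candidate)

-- ===== LEMMAS AND PROOFS =====

-- binary-search invariant: on a (≤)-sorted list, pvBis returns the lower-bound position
theorem pvBis_spec (out : List String) (s : String)
    (hsort : out.Pairwise (· ≤ ·)) :
    ∀ (n lo hi : Nat), hi - lo ≤ n → lo ≤ hi → hi ≤ out.length →
    (∀ i < lo, out.getD i "" < s) →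
    (∀ i, hi ≤ i → i < out.length → s ≤ out.getD i "") →
    lo ≤ pvBis out s lo hi ∧ pvBis out s lo hi ≤ hi ∧
    (∀ i < pvBis out s lo hi, out.getD i "" < s) ∧
    (∀ i, pvBis out s lo hi ≤ i → i < out.length → s ≤ out.getD i "") := by
  have hmono : ∀ (i j : Nat), i ≤ j → j < out.length → out.getD i "" ≤ out.getD j "" := by
    intro i j hij hj
    rcases lt_or_eq_of_le hij with h | h
    · have := List.pairwise_iff_getElem.mp hsort i j (lt_trans h hj) hj h
      simpa [List.getD_eq_getElem?_getD, List.getElem?_eq_getElem, lt_trans h hj, hj] using this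
    · subst h; exact le_refl _
  intro n
  induction n with
  | zero =>
    intro lo hi hn hlh hhi hlow hhigh
    have : ¬ lo < hi := by omega
    rw [pvBis, if_neg this]
    exact ⟨le_refl _, hlh, hlow, fun i hri hil => hhigh i (by omega) hil⟩
  | succ n ih =>
    intro lo hi hn hlh hhi hlow hhigh
    by_cases hlt : lo < hi
    · rw [pvBis, if_pos hlt]
      simp only
      set mid := (lo + hi) / 2 with hmid
      have hm1 : lo ≤ mid := by omega
      have hm2 : mid < hi := by omega
      by_cases hc : out.getD mid "" < s
      · rw [if_pos hc]
        have hlow' : ∀ i < mid + 1, out.getD i "" < s := by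
          intro i hi'
          by_cases h : i < lo
          · exact hlow i h
          · exact lt_of_le_of_lt (hmono i mid (by omega) (by omega)) hc
        have := ih (mid + 1) hi (by omega) (by omega) hhi hlow' hhigh
        exact ⟨by omega, this.2.1, this.2.2.1, this.2.2.2⟩
      · rw [if_neg hc]
        have hhigh' : ∀ i, mid ≤ i → i < out.length → s ≤ out.getD i "" := by
          intro i hmi hil
          by_cases h : hi ≤ i
          · exact hhigh i h hil
          · exact le_trans (not_lt.mp hc) (hmono mid i hmi hil)
        have := ih lo mid (by omega) (by omega) (by omega) hlow hhigh'
        exact ⟨this.1, by omega, this.2.2.1, this.2.2.2⟩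
    · rw [pvBis, if_neg hlt]
      exact ⟨le_refl _, hlh, hlow, fun i hri hil => hhigh i (by omega) hil⟩

-- one insertion step keeps the list strictly sorted and adds exactly the cleaned string
theorem pvInsStep_spec (out : List String) (region : Option String)
    (hs : out.Pairwise (· < ·)) :
    (pvInsStep out region).Pairwise (· < ·) ∧
    (∀ x, x ∈ pvInsStep out region ↔
      (pvClean region ≠ "" ∧ x = pvClean region) ∨ x ∈ out) := by
  unfold pvInsStep
  set s := PySem.Str.strip (region.getD "") with hsdef
  have hcl : pvClean region = s := rfl
  by_cases hse : s = ""
  · rw [if_pos hse]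
    refine ⟨hs, fun x => ?_⟩
    simp [hcl, hse]
  · rw [if_neg hse]
    have hle : out.Pairwise (· ≤ ·) := hs.imp le_of_lt
    obtain ⟨h0, hr1, hlow, hhigh⟩ :=
      pvBis_spec out s hle out.length 0 out.length (by omega) (by omega) (le_refl _)
        (by omega) (fun i h1 h2 => by omega)
    set r := pvBis out s 0 out.length with hrdef
    have hgetr : ∀ (h : r < out.length), out.getD r "" = out[r] := by
      intro h; simp [List.getD_eq_getElem?_getD, List.getElem?_eq_getElem, h]
    by_cases hins : r = out.length ∨ out.getD r "" ≠ s
    · rw [if_pos hins]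
      have hrl : r ≤ out.length := hr1
      rw [PySem.List.insert_natCast out r s hrl]
      -- s is not in out: before r all < s, at/after r all > s
      have hafter : ∀ i, r ≤ i → i < out.length → s < out.getD i "" := by
        intro i hri hil
        rcases hins with h | h
        · omega
        · have hrlt : r < out.length := by
            rcases lt_or_eq_of_le hrl with h' | h'
            · exact h'
            · exfalso; apply h; omega
          have hge : s ≤ out.getD r "" := hhigh r (le_refl _) hrlt
          have hgt : s < out.getD r "" := lt_of_le_of_ne hge (Ne.symm h)
          rcases lt_or_eq_of_le hri with h' | h'
          · have hlt2 := List.pairwise_iff_getElem.mp hs r i hrlt hil h'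
            have h2 : out.getD r "" ≤ out.getD i "" := by
              simpa [List.getD_eq_getElem?_getD, List.getElem?_eq_getElem, hrlt, hil] using le_of_lt hlt2
            exact lt_of_lt_of_le hgt h2
          · subst h'; exact hgt
      constructor
      · -- pairwise on take r ++ s :: drop r
        rw [List.pairwise_append]
        refine ⟨hs.sublist (List.take_sublist r out), ?_, ?_⟩
        · rw [List.pairwise_cons]
          refine ⟨?_, hs.sublist (List.drop_sublist r out)⟩
          intro y hy
          obtain ⟨j, hj, rfl⟩ := List.mem_iff_getElem.mp hy
          have hjl : r + j < out.length := by
            have := hj; simp [List.length_drop] at this; omega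
          have h2 := hafter (r + j) (by omega) hjl
          rw [List.getElem_drop]
          simpa [List.getD_eq_getElem?_getD, List.getElem?_eq_getElem, hjl] using h2
        · intro a ha b hb
          obtain ⟨j, hj, rfl⟩ := List.mem_iff_getElem.mp ha
          have hjr : j < r := by simp [List.length_take] at hj; omega
          have hjl : j < out.length := by omega
          have hja : out.getD j "" < s := hlow j hjr
          rw [List.getElem_take]
          have hja' : out[j] < s := by
            simpa [List.getD_eq_getElem?_getD, List.getElem?_eq_getElem, hjl] using hja
          rcases List.mem_cons.mp hb with rfl | hb'
          · exact hja'
          · obtain ⟨k, hk, rfl⟩ := List.mem_iff_getElem.mp hb'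
            have hkl : r + k < out.length := by
              have := hk; simp [List.length_drop] at this; omega
            rw [List.getElem_drop]
            have h2 := hafter (r + k) (by omega) hkl
            have h2' : s < out[r + k] := by
              simpa [List.getD_eq_getElem?_getD, List.getElem?_eq_getElem, hkl] using h2
            exact lt_trans hja' h2'
      · intro x
        constructor
        · intro hx
          rcases List.mem_append.mp hx with h | h
          · exact Or.inr ((List.take_sublist r out).mem h)
          · rcases List.mem_cons.mp h with rfl | h'
            · exact Or.inl ⟨by rw [hcl]; exact hse, hcl⟩
            · exact Or.inr ((List.drop_sublist r out).mem h')
        · intro hx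
          rcases hx with ⟨_, rfl⟩ | hx
          · rw [hcl]; exact List.mem_append.mpr (Or.inr (List.mem_cons_self))
          · rw [List.mem_append, List.mem_cons]
            have : x ∈ out.take r ++ out.drop r := by
              rw [List.take_append_drop]; exact hx
            rcases List.mem_append.mp this with h | h
            · exact Or.inl h
            · exact Or.inr (Or.inr h)
    · rw [if_neg hins]
      push_neg at hins
      obtain ⟨hrlt', hreq⟩ := hins
      have hrlt : r < out.length := lt_of_le_of_ne hr1 hrlt'
      have hmem : s ∈ out := by
        rw [← hreq, hgetr hrlt]
        exact List.getElem_mem hrlt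
      exact ⟨hs, fun x => by
        constructor
        · exact fun h => Or.inr h
        · rintro (⟨_, rfl⟩ | h)
          · rw [hcl]; exact hmem
          · exact h⟩

-- folding the insertion step accumulates exactly A's comprehension members, strictly sorted
theorem pvFold_spec (xs : List (Option String)) :
    ∀ (acc : List String), acc.Pairwise (· < ·) →
    (xs.foldl pvInsStep acc).Pairwise (· < ·) ∧
    (∀ x, x ∈ xs.foldl pvInsStep acc ↔ x ∈ acc ∨
      x ∈ xs.filterMap (fun region => if pvClean region ≠ "" then some (pvClean region) else none)) := by
  induction xs with
  | nil =>
    intro acc hacc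
    refine ⟨by simpa using hacc, fun x => ?_⟩
    simp
  | cons r t ih =>
    intro acc hacc
    obtain ⟨h1, h2⟩ := pvInsStep_spec acc r hacc
    obtain ⟨h3, h4⟩ := ih (pvInsStep acc r) h1
    refine ⟨h3, fun x => ?_⟩
    rw [List.foldl_cons, h4 x, h2 x]
    by_cases hc : pvClean r ≠ ""
    · simp only [List.filterMap_cons, if_pos hc, List.mem_cons]
      constructor
      · rintro ((⟨_, rfl⟩ | h) | h)
        · exact Or.inr (Or.inl rfl)
        · exact Or.inl h
        · exact Or.inr (Or.inr h)
      · rintro (h | rfl | h)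
        · exact Or.inl (Or.inr h)
        · exact Or.inl (Or.inl ⟨hc, rfl⟩)
        · exact Or.inr h
    · simp only [List.filterMap_cons, if_neg hc]
      push_neg at hc
      constructor
      · rintro ((⟨hne, _⟩ | h) | h)
        · exact absurd hc hne
        · exact Or.inl h
        · exact Or.inr h
      · rintro (h | h)
        · exact Or.inl (Or.inr h)
        · exact Or.inr h

-- ===== VERDICT (by name: the statement is the Claim_ definition above) =====
theorem policy_candidate_target_regions_py_spec : Claim_equal_policy_candidate_target_regions_py := by
  intro candidate _
  unfold Spec_policy_candidate_target_regions_py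
  unfold policy_candidate_target_regions_py policy_candidate_target_regions_py_alt
  set xs := ((PySem.Dict.mk candidate).get? "target_regions").getD [] with hxs
  set cs := xs.filterMap
      (fun region => if pvClean region ≠ "" then some (pvClean region) else none) with hcs
  obtain ⟨hsorted, hmem⟩ := pvFold_spec xs [] (by simp)
  have hnd1 : (xs.foldl pvInsStep []).Nodup := hsorted.imp ne_of_lt
  have hnd2 : (PySem.Set.ofList cs).Nodup := PySem.Set.nodup_ofList cs
  have hperm : (xs.foldl pvInsStep []).Perm (PySem.Set.ofList cs) := by
    refine (List.perm_ext_iff_of_nodup hnd1 hnd2).mpr fun x => ?_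
    rw [hmem x, PySem.Set.mem_ofList]
    simp only [List.not_mem_nil, false_or]
    rw [hcs]
  exact PySem.List.sorted_eq_of_perm_of_pairwise_lt (PySem.Set.ofList cs) _ (fun x => x)
    hperm hsorted
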